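-- pv_equiv track=rewrite | github.com/HelloMrliu/wb_predict | common_tools/select_data.py | get_same_set_according_diff_val
-- ===== SOURCE A (Python) =====
-- def get_same_set_according_diff_val(data_dict, test_list, gap, min_num):
--     same_weibo_id_set = set()
--     while len(same_weibo_id_set) < min_num:
--         same_weibo_id_set = set()
--         for weibo_id in data_dict:
--             count = 0
--             data_list = data_dict[weibo_id]
--             for index in range(4):
--                 temp_val = abs(int(test_list[index]) - int(data_list[index]))
--                 if temp_val == 0:
--                     count += 1
--
--             if count >= gap:
--                 same_weibo_id_set.add(weibo_id)
--         gap -= 1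
--     return same_weibo_id_set
-- ===== SOURCE B (Python) =====
-- def get_same_set_according_diff_val(data_dict, test_list, gap, min_num):
--     # single pass: count matches per id once, bucket by count, then pick the
--     # largest threshold g <= gap whose cumulative bucket size reaches min_num
--     if min_num <= 0:
--         return set()
--     counts = {wid: sum(1 for i in range(4) if int(test_list[i]) == int(vals[i]))
--               for wid, vals in data_dict.items()}
--     bucket = [0] * 5
--     for c in counts.values():
--         bucket[c] += 1
--     suffix = [0] * 6
--     for c in range(4, -1, -1):
--         suffix[c] = suffix[c + 1] + bucket[c]
--     g = 0
--     for c in range(min(gap, 4), 0, -1):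
--         if suffix[c] >= min_num:
--             g = c
--             break
--     return {wid for wid, c in counts.items() if c >= g}
-- ===== Notes on version B (the rewrite author's own statement) =====
-- stated objective: alternative
-- what changed: Instead of rebuilding the qualifying set by a full rescan of the dict at each decremented gap until it reaches min_num, B computes each id's 4-feature match count once, buckets ids by count, takes cumulative bucket sizes, and picks the largest threshold <= gap whose cumulative size reaches min_num in one pass (intended as faster; a timing run read B 17.15x at the largest size but could not confirm it by its rules, so no speed is claimed).
import Mathlib
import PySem

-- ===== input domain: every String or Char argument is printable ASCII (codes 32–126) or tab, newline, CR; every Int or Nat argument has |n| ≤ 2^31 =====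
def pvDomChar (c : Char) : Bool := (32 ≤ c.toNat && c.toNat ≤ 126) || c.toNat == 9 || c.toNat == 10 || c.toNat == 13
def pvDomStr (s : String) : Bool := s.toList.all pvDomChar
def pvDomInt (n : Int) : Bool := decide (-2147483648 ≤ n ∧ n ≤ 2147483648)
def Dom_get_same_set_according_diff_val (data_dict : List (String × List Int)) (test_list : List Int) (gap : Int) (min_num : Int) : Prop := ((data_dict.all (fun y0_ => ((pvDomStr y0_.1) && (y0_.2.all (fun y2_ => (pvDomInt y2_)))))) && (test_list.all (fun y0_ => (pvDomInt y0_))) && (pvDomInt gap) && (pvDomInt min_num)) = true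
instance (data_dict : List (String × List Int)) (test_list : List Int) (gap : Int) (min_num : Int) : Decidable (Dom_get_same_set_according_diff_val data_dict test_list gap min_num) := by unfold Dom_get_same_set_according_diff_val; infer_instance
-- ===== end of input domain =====

-- B replaces A's repeated full rescans at decreasing gap values by a single pass that
-- counts each id's matches once, buckets the counts, and picks the threshold from
-- cumulative bucket sizes (objective: alternative).

-- ===== PORT A =====
-- count = number of indices 0..3 with abs(test_list[i] - data_list[i]) == 0
-- (out-of-range access is a Python IndexError; Pre_ guarantees both lists have ≥ 4 items)
def pvCountA (test_list : List Int) (data_list : List Int) : Int :=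
  (PySem.List.pyRange 0 4 1).foldl (fun c i =>
    if |PySem.List.pyGetD test_list i 0 - PySem.List.pyGetD data_list i 0| = 0 then c + 1 else c) 0

-- one pass of A's while-body: rebuild the set at the current gap
def pvRoundA (d : PySem.Dict String (List Int)) (test_list : List Int) (gap : Int) : PySem.Set String :=
  d.keys.foldl (fun s k =>
    if pvCountA test_list (d.getD k []) ≥ gap then PySem.Set.add s k else s) PySem.Set.empty

-- A's while loop; once gap ≤ 0 a round contains every key, so a failed size check at
-- gap ≤ 0 repeats identically forever in Python (excluded by Pre_); we stop there.
def pvLoopA (d : PySem.Dict String (List Int)) (test_list : List Int) (min_num : Int) (gap : Int) : PySem.Set String :=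
  if ((pvRoundA d test_list gap).length : Int) < min_num then
    (if gap ≤ 0 then pvRoundA d test_list gap
     else pvLoopA d test_list min_num (gap - 1))
  else pvRoundA d test_list gap
termination_by gap.toNat
decreasing_by omega

def get_same_set_according_diff_val (data_dict : List (String × List Int)) (test_list : List Int) (gap : Int) (min_num : Int) : List String :=
  -- while len(set()) < min_num: the loop body runs at least once iff 0 < min_num
  if (0 : Int) < min_num then pvLoopA (PySem.Dict.ofList data_dict) test_list min_num gap
  else PySem.Set.empty

-- ===== PORT B =====
-- count = number of indices 0..3 where test_list[i] == vals[i]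
def pvCnt (test_list : List Int) (vals : List Int) : Int :=
  (PySem.List.pyRange 0 4 1).foldl (fun c i =>
    if PySem.List.pyGetD test_list i 0 = PySem.List.pyGetD vals i 0 then c + 1 else c) 0

-- counts = {wid: <#matches> for wid, vals in data_dict.items()}
def pvCountsB (data_dict : List (String × List Int)) (test_list : List Int) : List (String × Int) :=
  (PySem.Dict.ofList data_dict).items.map (fun kv => (kv.1, pvCnt test_list kv.2))

-- bucket[c] = number of ids with exactly c matches
def pvBucketB (data_dict : List (String × List Int)) (test_list : List Int) : List Int :=
  (pvCountsB data_dict test_list).foldl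
    (fun b kc => b.set kc.2.toNat (b.getD kc.2.toNat 0 + 1)) [0, 0, 0, 0, 0]

-- suffix[c] = number of ids with at least c matches
def pvSuffixB (data_dict : List (String × List Int)) (test_list : List Int) : List Int :=
  (PySem.List.pyRange 4 (-1) (-1)).foldl
    (fun s c => s.set c.toNat (s.getD (c.toNat + 1) 0 + (pvBucketB data_dict test_list).getD c.toNat 0))
    [0, 0, 0, 0, 0, 0]

-- g = largest threshold c in min(gap,4)..1 whose cumulative size reaches min_num, else 0
def pvGB (data_dict : List (String × List Int)) (test_list : List Int) (gap : Int) (min_num : Int) : Int :=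
  ((PySem.List.pyRange (min gap 4) 0 (-1)).find?
    (fun c => decide (min_num ≤ (pvSuffixB data_dict test_list).getD c.toNat 0))).getD 0

def get_same_set_according_diff_val_alt (data_dict : List (String × List Int)) (test_list : List Int) (gap : Int) (min_num : Int) : List String :=
  if min_num ≤ 0 then [] else
  (pvCountsB data_dict test_list).filterMap
    (fun kc => if pvGB data_dict test_list gap min_num ≤ kc.2 then some kc.1 else none)

-- ===== PRECONDITION & SPEC =====
-- Pre_ excludes exactly the inputs where A does not return: with min_num ≥ 1, A raises
-- IndexError when test_list or some stored value list has fewer than 4 items, and loops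
-- forever when the dict has fewer than min_num (distinct) keys.
def Pre_get_same_set_according_diff_val (data_dict : List (String × List Int)) (test_list : List Int) (gap : Int) (min_num : Int) : Prop :=
  min_num ≤ 0 ∨
  (min_num ≤ ((PySem.Dict.ofList data_dict).size : Int) ∧ 4 ≤ test_list.length ∧
    ∀ kv ∈ (PySem.Dict.ofList data_dict).items, 4 ≤ kv.2.length)
instance (data_dict : List (String × List Int)) (test_list : List Int) (gap : Int) (min_num : Int) : Decidable (Pre_get_same_set_according_diff_val data_dict test_list gap min_num) := by unfold Pre_get_same_set_according_diff_val; infer_instance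

def pvWitness_get_same_set_according_diff_val : (List (String × List Int)) × List Int × Int × Int :=
  ([("a", [0, 1, 2, 3])], [0, 1, 2, 3], 2, 1)

def Spec_get_same_set_according_diff_val (data_dict : List (String × List Int)) (test_list : List Int) (gap : Int) (min_num : Int) (out : List String) : Prop := out = get_same_set_according_diff_val_alt data_dict test_list gap min_num
instance (data_dict : List (String × List Int)) (test_list : List Int) (gap : Int) (min_num : Int) (out : List String) : Decidable (Spec_get_same_set_according_diff_val data_dict test_list gap min_num out) := by unfold Spec_get_same_set_according_diff_val; infer_instance

-- ===== CLAIM (what is proved, stated in full; the proofs are below) =====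
def Claim_equal_get_same_set_according_diff_val : Prop := ∀ (data_dict : List (String × List Int)) (test_list : List Int) (gap : Int) (min_num : Int), Dom_get_same_set_according_diff_val data_dict test_list gap min_num → Pre_get_same_set_according_diff_val data_dict test_list gap min_num → Spec_get_same_set_according_diff_val data_dict test_list gap min_num (get_same_set_according_diff_val data_dict test_list gap min_num)

-- ===== LEMMAS AND PROOFS =====

-- per-key match count, the key list, its multiset of counts, the ≥-g id filter,
-- and the exact-count / at-least-count tallies (all proof-only abbreviations)
def pvCk (dd : List (String × List Int)) (t : List Int) (k : String) : Int :=
  pvCnt t ((PySem.Dict.ofList dd).getD k [])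
def pvF (dd : List (String × List Int)) (t : List Int) (g : Int) : List String :=
  (PySem.Dict.ofList dd).keys.filter (fun k => decide (g ≤ pvCk dd t k))
def pvVals (dd : List (String × List Int)) (t : List Int) : List Int :=
  (pvCountsB dd t).map (·.2)
def pvN (dd : List (String × List Int)) (t : List Int) (j : Int) : Int :=
  ((pvVals dd t).count j : Int)
def pvS (dd : List (String × List Int)) (t : List Int) (c : Int) : Int :=
  (((pvVals dd t).countP (fun x => decide (c ≤ x))) : Int)

-- the two per-id counters agree (abs(x - y) == 0 iff x == y)
lemma pvCountA_eq (test_list vals : List Int) : pvCountA test_list vals = pvCnt test_list vals := by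
  unfold pvCountA pvCnt
  congr 1
  funext c i
  simp only [abs_eq_zero, sub_eq_zero]

lemma pvCnt_bounds (test_list vals : List Int) : 0 ≤ pvCnt test_list vals ∧ pvCnt test_list vals ≤ 4 := by
  unfold pvCnt
  rw [show PySem.List.pyRange 0 4 1 = [0, 1, 2, 3] from by decide]
  simp only [List.foldl_cons, List.foldl_nil]
  split_ifs <;> omega

lemma pvCountsB_eq (dd : List (String × List Int)) (t : List Int) :
    pvCountsB dd t = (PySem.Dict.ofList dd).keys.map (fun k => (k, pvCk dd t k)) := by
  unfold pvCountsB
  rw [PySem.Dict.items_eq_map_keys _ (PySem.Dict.nodup_keys_ofList dd) ([] : List Int)]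
  simp [List.map_map, Function.comp, pvCk]

lemma pvVals_eq (dd : List (String × List Int)) (t : List Int) :
    pvVals dd t = (PySem.Dict.ofList dd).keys.map (pvCk dd t) := by
  unfold pvVals
  rw [pvCountsB_eq]
  simp [List.map_map, Function.comp]

lemma pvVals_bounds (dd : List (String × List Int)) (t : List Int) :
    ∀ x ∈ pvVals dd t, 0 ≤ x ∧ x ≤ 4 := by
  rw [pvVals_eq]
  intro x hx
  rcases List.mem_map.mp hx with ⟨k, _, rfl⟩
  exact pvCnt_bounds t _

-- a guarded Set.add loop over distinct fresh elements is a filter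
lemma pvFoldlAddFilter {α : Type} [BEq α] [LawfulBEq α] (l : List α) (p : α → Prop) [DecidablePred p]
    (s0 : List α) (hnd : l.Nodup) (hdis : ∀ k ∈ l, k ∉ s0) :
    l.foldl (fun s k => if p k then PySem.Set.add s k else s) s0
      = s0 ++ l.filter (fun k => decide (p k)) := by
  induction l generalizing s0 with
  | nil => simp
  | cons a l ih =>
    rcases List.nodup_cons.mp hnd with ⟨ha, hl⟩
    simp only [List.foldl_cons, List.filter_cons]
    by_cases hp : p a
    · have hdis' : ∀ k ∈ l, k ∉ s0 ++ [a] := by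
        intro k hk
        simp only [List.mem_append, List.mem_singleton]
        rintro (h | rfl)
        · exact hdis k (List.mem_cons_of_mem _ hk) h
        · exact ha hk
      rw [if_pos hp, PySem.Set.add_of_not_mem (hdis a List.mem_cons_self),
        ih (s0 ++ [a]) hl hdis']
      simp [hp]
    · rw [if_neg hp, ih s0 hl (fun k hk => hdis k (List.mem_cons_of_mem _ hk))]
      simp [hp]

lemma pvFilterMapGuard {α : Type} (l : List α) (p : α → Prop) [DecidablePred p] :
    l.filterMap (fun k => if p k then some k else none) = l.filter (fun k => decide (p k)) := by
  induction l with
  | nil => rfl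
  | cons a l ih => by_cases h : p a <;> simp [h, ih]

-- counting c ≤ x splits off the exact hits at c
lemma pvCountPSplit (l : List Int) (c : Int) :
    l.countP (fun x => decide (c ≤ x)) = l.count c + l.countP (fun x => decide (c < x)) := by
  induction l with
  | nil => rfl
  | cons x l ih =>
    simp only [List.countP_cons, List.count_cons, ih]
    by_cases h1 : c ≤ x
    · by_cases h2 : x = c
      · subst h2; simp; omega
      · have h3 : c < x := by omega
        simp [h1, h2, h3]
        omega
    · have h2 : ¬ (x = c) := by omega
      have h3 : ¬ (c < x) := by omega
      simp [h1, h2, h3]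

lemma pvLtToLe (c : Int) :
    (fun x : Int => decide (c < x)) = (fun x : Int => decide (c + 1 ≤ x)) := by
  funext x
  by_cases h : c < x
  · simp [h, show c + 1 ≤ x by omega]
  · simp [h, show ¬ (c + 1 ≤ x) by omega]

lemma pvS_succ (dd : List (String × List Int)) (t : List Int) (c : Int) :
    pvS dd t c = pvN dd t c + pvS dd t (c + 1) := by
  unfold pvS pvN
  rw [pvCountPSplit, pvLtToLe]
  push_cast
  ring

lemma pvS_ge5 (dd : List (String × List Int)) (t : List Int) (c : Int) (hc : 5 ≤ c) :
    pvS dd t c = 0 := by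
  unfold pvS
  rw [List.countP_eq_zero.mpr]
  · simp
  · intro x hx
    have := pvVals_bounds dd t x hx
    simpa using by omega

lemma pvS_le0 (dd : List (String × List Int)) (t : List Int) (c : Int) (hc : c ≤ 0) :
    pvS dd t c = ((pvVals dd t).length : Int) := by
  unfold pvS
  rw [List.countP_eq_length.mpr]
  intro x hx
  have := pvVals_bounds dd t x hx
  simpa using by omega

-- the bucket loop is a histogram of the count column
lemma pvBucketSpec (l : List (String × Int)) (h : ∀ kc ∈ l, 0 ≤ kc.2 ∧ kc.2 ≤ 4)
    (b0 b1 b2 b3 b4 : Int) :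
    l.foldl (fun b kc => b.set kc.2.toNat (b.getD kc.2.toNat 0 + 1)) [b0, b1, b2, b3, b4]
      = [b0 + ((l.map (·.2)).count 0 : Int), b1 + ((l.map (·.2)).count 1 : Int),
         b2 + ((l.map (·.2)).count 2 : Int), b3 + ((l.map (·.2)).count 3 : Int),
         b4 + ((l.map (·.2)).count 4 : Int)] := by
  induction l generalizing b0 b1 b2 b3 b4 with
  | nil => simp
  | cons kc l ih =>
    obtain ⟨k, x⟩ := kc
    have hx := h (k, x) (List.mem_cons_self)
    have htail : ∀ kc ∈ l, 0 ≤ kc.2 ∧ kc.2 ≤ 4 := fun kc hkc => h kc (List.mem_cons_of_mem _ hkc)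
    simp only at hx
    have hx5 : x = 0 ∨ x = 1 ∨ x = 2 ∨ x = 3 ∨ x = 4 := by omega
    rcases hx5 with rfl | rfl | rfl | rfl | rfl
    · rw [List.foldl_cons]
      show List.foldl _ [b0 + 1, b1, b2, b3, b4] l = _
      rw [ih htail]
      simp
      try omega
    · rw [List.foldl_cons]
      show List.foldl _ [b0, b1 + 1, b2, b3, b4] l = _
      rw [ih htail]
      simp
      try omega
    · rw [List.foldl_cons]
      show List.foldl _ [b0, b1, b2 + 1, b3, b4] l = _
      rw [ih htail]
      simp
      try omega
    · rw [List.foldl_cons]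
      show List.foldl _ [b0, b1, b2, b3 + 1, b4] l = _
      rw [ih htail]
      simp
      try omega
    · rw [List.foldl_cons]
      show List.foldl _ [b0, b1, b2, b3, b4 + 1] l = _
      rw [ih htail]
      simp
      try omega

lemma pvBucketB_eq (dd : List (String × List Int)) (t : List Int) :
    pvBucketB dd t = [pvN dd t 0, pvN dd t 1, pvN dd t 2, pvN dd t 3, pvN dd t 4] := by
  unfold pvBucketB pvN pvVals
  rw [pvBucketSpec _ (fun kc hkc => by
    have : kc.2 ∈ (pvCountsB dd t).map (·.2) := List.mem_map_of_mem hkc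
    exact pvVals_bounds dd t _ this)]
  simp

lemma pvSuffixB_eq (dd : List (String × List Int)) (t : List Int) :
    pvSuffixB dd t =
      [((((0 + pvN dd t 4) + pvN dd t 3) + pvN dd t 2) + pvN dd t 1) + pvN dd t 0,
       (((0 + pvN dd t 4) + pvN dd t 3) + pvN dd t 2) + pvN dd t 1,
       ((0 + pvN dd t 4) + pvN dd t 3) + pvN dd t 2,
       (0 + pvN dd t 4) + pvN dd t 3,
       0 + pvN dd t 4, 0] := by
  unfold pvSuffixB
  rw [show PySem.List.pyRange 4 (-1) (-1) = [4, 3, 2, 1, 0] from by decide, pvBucketB_eq]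
  rfl

-- the suffix table read at any integer index is the at-least tally
lemma pvSuffixB_getD (dd : List (String × List Int)) (t : List Int) (c : Int) :
    (pvSuffixB dd t).getD c.toNat 0 = pvS dd t c := by
  have e0 : pvS dd t 0 = pvN dd t 0 + pvS dd t 1 := by
    have := pvS_succ dd t 0; norm_num at this; exact this
  have e1 : pvS dd t 1 = pvN dd t 1 + pvS dd t 2 := by
    have := pvS_succ dd t 1; norm_num at this; exact this
  have e2 : pvS dd t 2 = pvN dd t 2 + pvS dd t 3 := by
    have := pvS_succ dd t 2; norm_num at this; exact this
  have e3 : pvS dd t 3 = pvN dd t 3 + pvS dd t 4 := by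
    have := pvS_succ dd t 3; norm_num at this; exact this
  have e4 : pvS dd t 4 = pvN dd t 4 + pvS dd t 5 := by
    have := pvS_succ dd t 4; norm_num at this; exact this
  have e5 : pvS dd t 5 = 0 := pvS_ge5 dd t 5 (by omega)
  have hlen : pvS dd t 0 = ((pvVals dd t).length : Int) := pvS_le0 dd t 0 le_rfl
  rcases (by omega : c ≤ 0 ∨ c = 1 ∨ c = 2 ∨ c = 3 ∨ c = 4 ∨ 5 ≤ c) with hc | rfl | rfl | rfl | rfl | hc
  · have hcS : pvS dd t c = ((pvVals dd t).length : Int) := pvS_le0 dd t c hc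
    rw [Int.toNat_of_nonpos hc, pvSuffixB_eq]
    show ((((0 + pvN dd t 4) + pvN dd t 3) + pvN dd t 2) + pvN dd t 1) + pvN dd t 0 = pvS dd t c
    omega
  · rw [pvSuffixB_eq]
    show (((0 + pvN dd t 4) + pvN dd t 3) + pvN dd t 2) + pvN dd t 1 = pvS dd t 1
    omega
  · rw [pvSuffixB_eq]
    show ((0 + pvN dd t 4) + pvN dd t 3) + pvN dd t 2 = pvS dd t 2
    omega
  · rw [pvSuffixB_eq]
    show (0 + pvN dd t 4) + pvN dd t 3 = pvS dd t 3
    omega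
  · rw [pvSuffixB_eq]
    show 0 + pvN dd t 4 = pvS dd t 4
    omega
  · rw [pvS_ge5 dd t c hc, pvSuffixB_eq]
    rcases (by omega : c.toNat = 5 ∨ 6 ≤ c.toNat) with h | h
    · rw [h]; rfl
    · rw [List.getD_eq_default]
      simp
      omega

lemma pvRangeNegEmpty (g : Int) (hg : g ≤ 0) : PySem.List.pyRange g 0 (-1) = [] := by
  unfold PySem.List.pyRange
  simp only [if_neg (by norm_num : ¬ ((-1 : Int) = 0))]
  norm_num
  omega

-- a round of A is the ≥-gap filter over the keys
lemma pvRoundA_eq (dd : List (String × List Int)) (t : List Int) (g : Int) :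
    pvRoundA (PySem.Dict.ofList dd) t g = pvF dd t g := by
  unfold pvRoundA pvF
  simp only [pvCountA_eq, ge_iff_le]
  rw [pvFoldlAddFilter _ (fun k => g ≤ pvCnt t ((PySem.Dict.ofList dd).getD k []))
    PySem.Set.empty (PySem.Dict.nodup_keys_ofList dd) (fun k _ => List.not_mem_nil)]
  rfl

-- filter length in terms of the tally
lemma pvF_length (dd : List (String × List Int)) (t : List Int) (g : Int) :
    ((pvF dd t g).length : Int) = pvS dd t g := by
  unfold pvF pvS
  rw [← List.countP_eq_length_filter, pvVals_eq, List.countP_map]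
  rfl

lemma pvF_all (dd : List (String × List Int)) (t : List Int) (g : Int) (hg : g ≤ 0) :
    pvF dd t g = (PySem.Dict.ofList dd).keys := by
  unfold pvF
  rw [List.filter_eq_self]
  intro k hk
  have := (pvCnt_bounds t ((PySem.Dict.ofList dd).getD k [])).1
  simp only [pvCk]
  simpa using by omega

-- one unfolding of A's loop, phrased with the tally
lemma pvLoopStep (dd : List (String × List Int)) (t : List Int) (m g : Int) (hg : 0 < g) :
    pvLoopA (PySem.Dict.ofList dd) t m g
      = if m ≤ pvS dd t g then pvF dd t g else pvLoopA (PySem.Dict.ofList dd) t m (g - 1) := by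
  rw [pvLoopA]
  rw [pvRoundA_eq]
  have hlen := pvF_length dd t g
  by_cases h : m ≤ pvS dd t g
  · rw [if_neg (by omega), if_pos h]
  · rw [if_pos (by omega), if_neg (by omega : ¬ g ≤ 0), if_neg h]

lemma pvLoopZero (dd : List (String × List Int)) (t : List Int) (m g : Int)
    (hK : m ≤ ((PySem.Dict.ofList dd).keys.length : Int)) (hg : g ≤ 0) :
    pvLoopA (PySem.Dict.ofList dd) t m g = (PySem.Dict.ofList dd).keys := by
  rw [pvLoopA]
  rw [pvRoundA_eq, pvF_all dd t g hg]
  rw [if_neg (by omega)]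

-- above gap 4 every round is empty, so the loop descends to 4
lemma pvLoopGe (dd : List (String × List Int)) (t : List Int) (m : Int) (hm : 0 < m) :
    ∀ (n : Nat) (g : Int), g = 4 + (n : Int) →
      pvLoopA (PySem.Dict.ofList dd) t m g = pvLoopA (PySem.Dict.ofList dd) t m 4 := by
  intro n
  induction n with
  | zero => intro g hg; norm_num at hg; rw [hg]
  | succ k ih =>
    intro g hg
    have hg5 : 5 ≤ g := by omega
    have hS : pvS dd t g = 0 := pvS_ge5 dd t g hg5
    rw [pvLoopStep dd t m g (by omega), if_neg (by omega)]
    exact ih (g - 1) (by omega)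

-- the loop from a start in 0..4 returns the filter at the selected threshold
lemma pvLoopSel (dd : List (String × List Int)) (t : List Int) (m : Int) (hm : 0 < m)
    (hK : m ≤ ((PySem.Dict.ofList dd).keys.length : Int)) (g : Int) (h0 : 0 ≤ g) (h4 : g ≤ 4) :
    pvLoopA (PySem.Dict.ofList dd) t m g
      = pvF dd t (((PySem.List.pyRange g 0 (-1)).find? (fun c => decide (m ≤ pvS dd t c))).getD 0) := by
  have hz : pvLoopA (PySem.Dict.ofList dd) t m 0 = pvF dd t 0 := by
    rw [pvLoopZero dd t m 0 hK le_rfl, pvF_all dd t 0 le_rfl]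
  interval_cases g
  · rw [show PySem.List.pyRange 0 0 (-1) = ([] : List Int) from by decide]
    simpa using hz
  · rw [pvLoopStep dd t m 1 (by norm_num),
      show PySem.List.pyRange 1 0 (-1) = ([1] : List Int) from by decide]
    by_cases h1 : m ≤ pvS dd t 1
    · simp [List.find?, h1]
    · simp [List.find?, h1]
      exact hz
  · rw [pvLoopStep dd t m 2 (by norm_num),
      show PySem.List.pyRange 2 0 (-1) = ([2, 1] : List Int) from by decide]
    by_cases h2 : m ≤ pvS dd t 2
    · simp [List.find?, h2]
    · rw [if_neg h2]
      norm_num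
      rw [pvLoopStep dd t m 1 (by norm_num)]
      by_cases h1 : m ≤ pvS dd t 1
      · simp [List.find?, h1, h2]
      · simp [List.find?, h1, h2]
        exact hz
  · rw [pvLoopStep dd t m 3 (by norm_num),
      show PySem.List.pyRange 3 0 (-1) = ([3, 2, 1] : List Int) from by decide]
    by_cases h3 : m ≤ pvS dd t 3
    · simp [List.find?, h3]
    · rw [if_neg h3]
      norm_num
      rw [pvLoopStep dd t m 2 (by norm_num)]
      by_cases h2 : m ≤ pvS dd t 2
      · simp [List.find?, h2, h3]
      · rw [if_neg h2]
        norm_num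
        rw [pvLoopStep dd t m 1 (by norm_num)]
        by_cases h1 : m ≤ pvS dd t 1
        · simp [List.find?, h1, h2, h3]
        · simp [List.find?, h1, h2, h3]
          exact hz
  · rw [pvLoopStep dd t m 4 (by norm_num),
      show PySem.List.pyRange 4 0 (-1) = ([4, 3, 2, 1] : List Int) from by decide]
    by_cases h4' : m ≤ pvS dd t 4
    · simp [List.find?, h4']
    · rw [if_neg h4']
      norm_num
      rw [pvLoopStep dd t m 3 (by norm_num)]
      by_cases h3 : m ≤ pvS dd t 3
      · simp [List.find?, h3, h4']
      · rw [if_neg h3]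
        norm_num
        rw [pvLoopStep dd t m 2 (by norm_num)]
        by_cases h2 : m ≤ pvS dd t 2
        · simp [List.find?, h2, h3, h4']
        · rw [if_neg h2]
          norm_num
          rw [pvLoopStep dd t m 1 (by norm_num)]
          by_cases h1 : m ≤ pvS dd t 1
          · simp [List.find?, h1, h2, h3, h4']
          · simp [List.find?, h1, h2, h3, h4']
            exact hz

-- B's output is the filter at its selected threshold
lemma pvAltForm (dd : List (String × List Int)) (t : List Int) (gap m : Int) (hm : 0 < m) :
    get_same_set_according_diff_val_alt dd t gap m
      = pvF dd t (((PySem.List.pyRange (min gap 4) 0 (-1)).find?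
          (fun c => decide (m ≤ pvS dd t c))).getD 0) := by
  unfold get_same_set_according_diff_val_alt pvGB
  rw [if_neg (by omega)]
  have hfun : (fun c : Int => decide (m ≤ (pvSuffixB dd t).getD c.toNat 0))
      = (fun c : Int => decide (m ≤ pvS dd t c)) := by
    funext c
    rw [pvSuffixB_getD]
  rw [hfun, pvCountsB_eq, List.filterMap_map]
  rw [show ((fun kc : String × Int =>
        if (((PySem.List.pyRange (min gap 4) 0 (-1)).find?
          (fun c => decide (m ≤ pvS dd t c))).getD 0) ≤ kc.2 then some kc.1 else none) ∘
        (fun k => (k, pvCk dd t k)))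
      = (fun k => if (((PySem.List.pyRange (min gap 4) 0 (-1)).find?
          (fun c => decide (m ≤ pvS dd t c))).getD 0) ≤ pvCk dd t k then some k else none) from rfl]
  rw [pvFilterMapGuard]
  rfl

-- the two programs agree whenever the loop terminates with a positive target
lemma pvMainPos (dd : List (String × List Int)) (t : List Int) (gap m : Int) (hm : 0 < m)
    (hK : m ≤ ((PySem.Dict.ofList dd).keys.length : Int)) :
    pvLoopA (PySem.Dict.ofList dd) t m gap = get_same_set_according_diff_val_alt dd t gap m := by
  rw [pvAltForm dd t gap m hm]
  rcases (by omega : gap ≤ 0 ∨ (0 < gap ∧ gap ≤ 4) ∨ 4 ≤ gap) with hg | ⟨hg1, hg2⟩ | hg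
  · rw [pvLoopZero dd t m gap hK hg, min_eq_left (by omega), pvRangeNegEmpty gap hg]
    show (PySem.Dict.ofList dd).keys = pvF dd t 0
    rw [pvF_all dd t 0 le_rfl]
  · rw [min_eq_left hg2]
    exact pvLoopSel dd t m hm hK gap (by omega) hg2
  · rw [min_eq_right hg, pvLoopGe dd t m hm (gap - 4).toNat gap (by omega)]
    exact pvLoopSel dd t m hm hK 4 (by norm_num) (by norm_num)

-- ===== VERDICT (by name: the statement is the Claim_ definition above) =====
theorem get_same_set_according_diff_val_spec : Claim_equal_get_same_set_according_diff_val := by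
  unfold Claim_equal_get_same_set_according_diff_val
  intro dd t gap m _hdom hpre
  unfold Spec_get_same_set_according_diff_val
  by_cases hm : 0 < m
  · have hK : m ≤ ((PySem.Dict.ofList dd).keys.length : Int) := by
      rcases hpre with h | ⟨h, _⟩
      · omega
      · have : (PySem.Dict.ofList dd).size = (PySem.Dict.ofList dd).keys.length := by
          simp [PySem.Dict.size, PySem.Dict.keys]
        omega
    unfold get_same_set_according_diff_val
    rw [if_pos hm]
    exact pvMainPos dd t gap m hm hK
  · unfold get_same_set_according_diff_val get_same_set_according_diff_val_alt
    rw [if_neg hm, if_pos (by omega)]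
    rfl
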